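-- pv_equiv track=rewrite | github.com/Zaiwen/ModelCorrection | model_correction/model_correction.py | gen_candidate_nodes_combination
-- ===== SOURCE A (Python) =====
-- from itertools import product
--
-- def gen_candidate_nodes_combination(iso_col_dic: dict, node_dic: dict):
--     ls = []
--     for k, v in iso_col_dic.items():
--         tmp = []
--         for cType in v:
--             tmp.append((node_dic[cType[0]], k, cType[0], cType[1]))
--         if tmp:
--             ls.append(tmp)
--
--     pros = product(*ls)
--
--     return list(pros)
-- ===== SOURCE B (Python) =====
-- def gen_candidate_nodes_combination(iso_col_dic: dict, node_dic: dict):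
--     # Recursive decomposition: no intermediate list of groups is built; combinations
--     # are produced directly by recursion over the dict entries, skipping empty groups.
--     items = list(iso_col_dic.items())
--
--     def rec(i):
--         if i == len(items):
--             return [()]
--         k, v = items[i]
--         if not v:
--             return rec(i + 1)
--         rest = rec(i + 1)
--         return [((node_dic[c[0]], k, c[0], c[1]),) + r for c in v for r in rest]
--
--     return rec(0)
-- ===== Notes on version B (the rewrite author's own statement) =====
-- stated objective: alternative
-- what changed: Drops A's two-stage structure (preprocessing pass building a list of groups, then itertools.product over it) in favour of a single direct recursion over the dict entries that emits the combinations on the fly, skipping empty groups as it goes.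
import Mathlib
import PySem

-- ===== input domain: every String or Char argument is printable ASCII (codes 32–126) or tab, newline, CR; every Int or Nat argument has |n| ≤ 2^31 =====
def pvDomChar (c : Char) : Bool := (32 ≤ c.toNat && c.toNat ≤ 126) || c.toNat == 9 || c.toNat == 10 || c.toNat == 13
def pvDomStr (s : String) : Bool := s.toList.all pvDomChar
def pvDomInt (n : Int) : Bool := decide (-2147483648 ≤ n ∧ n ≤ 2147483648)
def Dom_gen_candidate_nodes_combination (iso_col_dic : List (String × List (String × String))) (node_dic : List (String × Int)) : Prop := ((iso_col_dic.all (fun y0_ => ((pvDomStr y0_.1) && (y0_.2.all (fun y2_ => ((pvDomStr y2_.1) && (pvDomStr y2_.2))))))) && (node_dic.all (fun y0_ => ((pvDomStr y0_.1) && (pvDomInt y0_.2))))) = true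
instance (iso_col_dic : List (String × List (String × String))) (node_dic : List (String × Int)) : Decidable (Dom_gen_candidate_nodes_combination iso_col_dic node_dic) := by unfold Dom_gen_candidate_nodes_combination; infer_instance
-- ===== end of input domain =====

-- B replaces A's two-stage "build group list, then itertools.product" by a single direct
-- recursion over the dict entries that emits combinations on the fly (objective: alternative).

-- ===== PORT A =====
-- itertools.product(*ls): leftmost group varies slowest (recursive definition, exact ordering)
def pvProduct (gs : List (List (Int × String × String × String))) : List (List (Int × String × String × String)) :=
  match gs with
  | [] => [[]]
  | g :: rest => g.flatMap (fun x => (pvProduct rest).map (fun r => x :: r))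

def gen_candidate_nodes_combination (iso_col_dic : List (String × List (String × String))) (node_dic : List (String × Int)) : List (List (Int × String × String × String)) :=
  let ls := iso_col_dic.foldl (fun ls kv =>
    let tmp := kv.2.foldl (fun tmp cType =>
      tmp ++ [((((PySem.Dict.mk node_dic).get? cType.1).getD 0 : Int), kv.1, cType.1, cType.2)]) []
    if tmp ≠ [] then ls ++ [tmp] else ls) []
  pvProduct ls

-- ===== PORT B =====
-- Source B's rec(i): recursion over the remaining entries (the suffix items[i:]); an empty
-- group is skipped, a non-empty one contributes its candidates, each prepended to every
-- combination of the remaining entries.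
def pvAltRec (node_dic : List (String × Int)) (items : List (String × List (String × String))) : List (List (Int × String × String × String)) :=
  match items with
  | [] => [[]]
  | (k, v) :: rest =>
    if v = [] then pvAltRec node_dic rest
    else
      let rs := pvAltRec node_dic rest
      v.flatMap (fun c => rs.map (fun r => ((((PySem.Dict.mk node_dic).get? c.1).getD 0 : Int), k, c.1, c.2) :: r))

def gen_candidate_nodes_combination_alt (iso_col_dic : List (String × List (String × String))) (node_dic : List (String × Int)) : List (List (Int × String × String × String)) :=
  pvAltRec node_dic iso_col_dic

-- ===== PRECONDITION & SPEC =====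
-- Pre_ excludes exactly the inputs where Python A raises KeyError: some candidate's first
-- component is not a key of node_dic (B raises there too, except in groups it never visits).
def Pre_gen_candidate_nodes_combination (iso_col_dic : List (String × List (String × String))) (node_dic : List (String × Int)) : Prop :=
  ∀ kv ∈ iso_col_dic, ∀ c ∈ kv.2, c.1 ∈ node_dic.map Prod.fst

instance (iso_col_dic : List (String × List (String × String))) (node_dic : List (String × Int)) : Decidable (Pre_gen_candidate_nodes_combination iso_col_dic node_dic) := by unfold Pre_gen_candidate_nodes_combination; infer_instance

def pvWitness_gen_candidate_nodes_combination : (List (String × List (String × String))) × (List (String × Int)) :=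
  ([("col", [("x", "t1"), ("y", "t2")])], [("x", 1), ("y", 2)])

def Spec_gen_candidate_nodes_combination (iso_col_dic : List (String × List (String × String))) (node_dic : List (String × Int)) (out : List (List (Int × String × String × String))) : Prop := out = gen_candidate_nodes_combination_alt iso_col_dic node_dic
instance (iso_col_dic : List (String × List (String × String))) (node_dic : List (String × Int)) (out : List (List (Int × String × String × String))) : Decidable (Spec_gen_candidate_nodes_combination iso_col_dic node_dic out) := by unfold Spec_gen_candidate_nodes_combination; infer_instance

-- ===== CLAIM (what is proved, stated in full; the proofs are below) =====
def Claim_equal_gen_candidate_nodes_combination : Prop := ∀ (iso_col_dic : List (String × List (String × String))) (node_dic : List (String × Int)), Dom_gen_candidate_nodes_combination iso_col_dic node_dic → Pre_gen_candidate_nodes_combination iso_col_dic node_dic → Spec_gen_candidate_nodes_combination iso_col_dic node_dic (gen_candidate_nodes_combination iso_col_dic node_dic)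

-- ===== LEMMAS AND PROOFS =====

-- A's candidate tuple for key k and candidate c
def pvTup (node_dic : List (String × Int)) (k : String) (c : String × String) : Int × String × String × String :=
  ((((PySem.Dict.mk node_dic).get? c.1).getD 0 : Int), k, c.1, c.2)

-- A's inner loop builds the map of the group
lemma inner_foldl (node_dic : List (String × Int)) (k : String) (v : List (String × String))
    (acc : List (Int × String × String × String)) :
    v.foldl (fun tmp c => tmp ++ [pvTup node_dic k c]) acc = acc ++ v.map (pvTup node_dic k) := by
  induction v generalizing acc with
  | nil => simp
  | cons c cs ih => simp [ih]

-- A's outer step function, with the inner loop replaced by its value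
def pvStep (node_dic : List (String × Int))
    (ls : List (List (Int × String × String × String))) (kv : String × List (String × String)) :
    List (List (Int × String × String × String)) :=
  if kv.2 = [] then ls else ls ++ [kv.2.map (pvTup node_dic kv.1)]

lemma step_eq (node_dic : List (String × Int)) :
    (fun ls (kv : String × List (String × String)) =>
      let tmp := kv.2.foldl (fun tmp c => tmp ++ [pvTup node_dic kv.1 c]) []
      if tmp ≠ [] then ls ++ [tmp] else ls) = pvStep node_dic := by
  funext ls kv
  simp only [inner_foldl, List.nil_append, pvStep, ne_eq, List.map_eq_nil_iff, ite_not]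

-- A's outer loop collects the non-empty mapped groups
lemma outer_foldl (node_dic : List (String × Int)) (items : List (String × List (String × String)))
    (acc : List (List (Int × String × String × String))) :
    items.foldl (pvStep node_dic) acc
      = acc ++ items.filterMap (fun kv =>
          if kv.2 = [] then none else some (kv.2.map (pvTup node_dic kv.1))) := by
  induction items generalizing acc with
  | nil => simp
  | cons kv rest ih =>
      by_cases h : kv.2 = [] <;>
        simp [List.foldl_cons, pvStep, h, ih]

-- the product of the collected groups is exactly B's direct recursion
lemma product_filterMap (node_dic : List (String × Int)) (items : List (String × List (String × String))) :
    pvProduct (items.filterMap (fun kv =>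
        if kv.2 = [] then none else some (kv.2.map (pvTup node_dic kv.1))))
      = pvAltRec node_dic items := by
  induction items with
  | nil => rfl
  | cons kv rest ih =>
      obtain ⟨k, v⟩ := kv
      by_cases h : v = []
      · simp [h, pvAltRec, ih]
      · simp only [List.filterMap_cons, if_neg h]
        simp [pvProduct, pvAltRec, h, ih, pvTup, List.flatMap_map]

-- ===== VERDICT (by name: the statement is the Claim_ definition above) =====
theorem gen_candidate_nodes_combination_spec : Claim_equal_gen_candidate_nodes_combination := by
  intro iso_col_dic node_dic _ _
  unfold Spec_gen_candidate_nodes_combination gen_candidate_nodes_combination gen_candidate_nodes_combination_alt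
  show pvProduct (iso_col_dic.foldl (fun ls kv =>
      let tmp := kv.2.foldl (fun tmp c => tmp ++ [pvTup node_dic kv.1 c]) []
      if tmp ≠ [] then ls ++ [tmp] else ls) []) = pvAltRec node_dic iso_col_dic
  rw [step_eq, outer_foldl, List.nil_append, product_filterMap]
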